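-- pv_equiv track=rewrite | github.com/crapas1974/algo2 | basic_approach/greedy_meeting copy.py | meeting_selection
-- ===== SOURCE A (Python) =====
-- def meeting_selection(meeting_list, start, finish_of_before, selected, all_schedules = None, max_count = None):
--     if all_schedules == None:
--         all_schedules = []
--     if max_count == None:
--         max_count = [0]
--     if start >= len(meeting_list):
--         if len(selected) == max_count[0]:
--             all_schedules.append(selected[:])
--         elif len(selected) > max_count[0]:
--             max_count[0] = len(selected)
--             all_schedules.clear()
--             all_schedules.append(selected[:])
--         return all_schedules, max_count
--
--     for i in range(start, len(meeting_list)):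
--         meeting = meeting_list[i]
--         meeting_start = meeting[0]
--         meeting_finish = meeting[1]
--         if meeting_start > finish_of_before:
--             selected.append(meeting_list[i])
--             meeting_selection(meeting_list, i + 1, meeting_finish, selected, all_schedules, max_count)
--             selected.pop()
--     return all_schedules, max_count
-- ===== SOURCE B (Python) =====
-- # Iterative re-implementation: explicit DFS stack instead of self-recursion;
-- # each frame carries its own selected-list copy, so no append/pop restore is needed.
-- # Note: unlike A, B does not mutate the caller's `selected` transiently (A restores it anyway);
-- # the passed-in all_schedules/max_count lists are mutated in place exactly as in A.
-- def meeting_selection(meeting_list, start, finish_of_before, selected, all_schedules=None, max_count=None):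
--     if all_schedules is None:
--         all_schedules = []
--     if max_count is None:
--         max_count = [0]
--     n = len(meeting_list)
--     stack = [(start, finish_of_before, list(selected))]
--     while stack:
--         s, fin, sel = stack.pop()
--         if s >= n:
--             if len(sel) == max_count[0]:
--                 all_schedules.append(sel)
--             elif len(sel) > max_count[0]:
--                 max_count[0] = len(sel)
--                 all_schedules.clear()
--                 all_schedules.append(sel)
--             continue
--         for i in reversed(range(s, n)):
--             m = meeting_list[i]
--             if m[0] > fin:
--                 stack.append((i + 1, m[1], sel + [m]))
--     return all_schedules, max_count
-- ===== Notes on version B (the rewrite author's own statement) =====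
-- stated objective: alternative
-- what changed: Replaced A's self-recursion with append/pop backtracking on a shared selected list by an explicit DFS stack of (start, finish, own selected-copy) frames, pushing children in reverse index order so the DFS visit order is preserved; no restore step is needed.
-- outside the precondition, e.g. on meeting_selection([[1, 2]], 0, 5, [], None, []): A returns ([], []), B returns ([], [])
import Mathlib
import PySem

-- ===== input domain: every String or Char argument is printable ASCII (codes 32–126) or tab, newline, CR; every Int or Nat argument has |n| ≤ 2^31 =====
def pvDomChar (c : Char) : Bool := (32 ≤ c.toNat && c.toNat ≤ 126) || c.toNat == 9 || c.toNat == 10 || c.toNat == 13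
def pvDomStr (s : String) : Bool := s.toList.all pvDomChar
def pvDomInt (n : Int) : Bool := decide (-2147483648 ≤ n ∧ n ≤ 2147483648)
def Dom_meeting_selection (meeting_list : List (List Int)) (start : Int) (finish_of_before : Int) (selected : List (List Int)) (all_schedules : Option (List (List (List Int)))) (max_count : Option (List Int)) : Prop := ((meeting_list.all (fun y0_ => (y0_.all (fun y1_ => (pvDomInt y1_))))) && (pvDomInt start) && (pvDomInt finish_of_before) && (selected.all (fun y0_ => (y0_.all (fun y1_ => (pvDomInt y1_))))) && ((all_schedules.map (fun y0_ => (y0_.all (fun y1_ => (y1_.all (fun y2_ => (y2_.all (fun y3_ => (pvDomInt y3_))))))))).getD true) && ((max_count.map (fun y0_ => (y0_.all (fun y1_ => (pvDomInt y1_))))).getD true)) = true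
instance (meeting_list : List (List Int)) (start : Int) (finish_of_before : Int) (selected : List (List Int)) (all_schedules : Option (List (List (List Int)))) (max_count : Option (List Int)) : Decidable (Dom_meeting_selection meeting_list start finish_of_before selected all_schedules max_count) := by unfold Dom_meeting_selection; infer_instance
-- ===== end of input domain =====

-- B replaces A's self-recursion (append/pop backtracking on a shared selected list) by an
-- explicit DFS stack of frames each carrying its own selected-copy; same return value.
-- Side effects: A and B both mutate the caller's all_schedules/max_count lists in place;
-- A additionally mutates `selected` transiently but restores it — the equivalence proved
-- here is about the RETURN value.

-- ===== PORT A =====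
-- leaf logic of A: the `start >= len(meeting_list)` branch
def pvLeafA (sel : List (List Int)) (acc : List (List (List Int))) (mc : List Int) :
    List (List (List Int)) × List Int :=
  let l : Int := (sel.length : Int)
  let mc0 : Int := PySem.List.pyGetD mc 0 0   -- max_count[0]; Pre_ excludes empty max_count
  if l = mc0 then (acc ++ [sel], mc)
  else if l > mc0 then ([sel], l :: mc.drop 1)   -- max_count[0]=len; clear; append
  else (acc, mc)

-- termination lemmas for the ports (cited by name in decreasing_by, keeping the bodies small)
theorem pv_decA1 (n s : Int) : 2 * (n + 1 - s).toNat < 2 * (n + 1 - s).toNat + 1 := by omega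

theorem pv_decA2 (n i : Int) (h : i < n) :
    2 * (n + 1 - (i + 1)).toNat + 1 < 2 * (n + 1 - i).toNat := by omega

theorem pv_decA3 (n i : Int) (h : i < n) :
    2 * (n + 1 - (i + 1)).toNat < 2 * (n + 1 - i).toNat := by omega

mutual
-- body of A's recursive function (defaults already resolved); threads (selected, all_schedules, max_count)
def msA_go (ml : List (List Int)) (start fin : Int) (sel : List (List Int))
    (acc : List (List (List Int))) (mc : List Int) :
    List (List Int) × List (List (List Int)) × List Int :=
  if start ≥ (ml.length : Int) then
    let r := pvLeafA sel acc mc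
    (sel, r.1, r.2)
  else
    msA_loop ml start fin sel acc mc
termination_by 2 * ((ml.length : Int) + 1 - start).toNat + 1
decreasing_by exact pv_decA1 (ml.length : Int) start

-- A's `for i in range(start, len(meeting_list))` loop, as recursion on i
def msA_loop (ml : List (List Int)) (i fin : Int) (sel : List (List Int))
    (acc : List (List (List Int))) (mc : List Int) :
    List (List Int) × List (List (List Int)) × List Int :=
  if h : i < (ml.length : Int) then
    let meeting := PySem.List.pyGetD ml i []            -- meeting_list[i]; Pre_ excludes IndexError
    let mStart := PySem.List.pyGetD meeting 0 0         -- meeting[0]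
    let mFin := PySem.List.pyGetD meeting 1 0           -- meeting[1]
    if mStart > fin then
      let r := msA_go ml (i + 1) mFin (sel ++ [meeting]) acc mc   -- selected.append; recurse
      msA_loop ml (i + 1) fin r.1.dropLast r.2.1 r.2.2            -- selected.pop()
    else
      msA_loop ml (i + 1) fin sel acc mc
  else
    (sel, acc, mc)
termination_by 2 * ((ml.length : Int) + 1 - i).toNat
decreasing_by
  all_goals first
    | exact pv_decA2 (ml.length : Int) i h
    | exact pv_decA3 (ml.length : Int) i h
end

def meeting_selection (meeting_list : List (List Int)) (start : Int) (finish_of_before : Int) (selected : List (List Int)) (all_schedules : Option (List (List (List Int)))) (max_count : Option (List Int)) : List (List (List Int)) × List Int :=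
  let acc := match all_schedules with | none => [] | some a => a     -- if all_schedules == None
  let mc := match max_count with | none => [0] | some m => m         -- if max_count == None
  let r := msA_go meeting_list start finish_of_before selected acc mc
  (r.2.1, r.2.2)

-- ===== PORT B =====
-- leaf logic of B (same code as in Source B's `if s >= n` branch)
def pvLeafB (sel : List (List Int)) (acc : List (List (List Int))) (mc : List Int) :
    List (List (List Int)) × List Int :=
  let l : Int := (sel.length : Int)
  let mc0 : Int := PySem.List.pyGetD mc 0 0
  if l = mc0 then (acc ++ [sel], mc)
  else if l > mc0 then ([sel], l :: mc.drop 1)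
  else (acc, mc)

-- weight of a stack frame / of the whole stack, for termination of the while-loop
def pvFrameW (n s : Int) : Nat := (n + 1 - s).toNat.factorial
def pvStackW (n : Int) (st : List (Int × Int × List (List Int))) : Nat :=
  (st.map (fun f => pvFrameW n f.1)).sum

-- the body of B's `for i in reversed(range(s, n))` push loop
def pvPush (ml : List (List Int)) (fin : Int) (sel : List (List Int))
    (st : List (Int × Int × List (List Int))) (i : Int) :
    List (Int × Int × List (List Int)) :=
  let m := PySem.List.pyGetD ml i []
  if PySem.List.pyGetD m 0 0 > fin then
    (i + 1, PySem.List.pyGetD m 1 0, sel ++ [m]) :: st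
  else st

theorem pvStackW_cons (n : Int) (f : Int × Int × List (List Int))
    (st : List (Int × Int × List (List Int))) :
    pvStackW n (f :: st) = pvFrameW n f.1 + pvStackW n st := by
  simp [pvStackW]

theorem pvStackW_push_le (ml : List (List Int)) (fin : Int) (sel : List (List Int))
    (s : Int) :
    ∀ (l : List Int) (st : List (Int × Int × List (List Int))),
      (∀ i ∈ l, s ≤ i) →
      pvStackW ml.length (l.foldl (pvPush ml fin sel) st) ≤
        pvStackW ml.length st + l.length * ((ml.length : Int) - s).toNat.factorial := by
  intro l
  induction l with
  | nil => intro st _; simp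
  | cons a t ih =>
    intro st hmem
    simp only [List.foldl_cons, List.length_cons]
    calc pvStackW ml.length (t.foldl (pvPush ml fin sel) (pvPush ml fin sel st a))
        ≤ pvStackW ml.length (pvPush ml fin sel st a) +
            t.length * ((ml.length : Int) - s).toNat.factorial := by
          exact ih _ (fun i hi => hmem i (List.mem_cons_of_mem _ hi))
      _ ≤ pvStackW ml.length st + ((ml.length : Int) - s).toNat.factorial +
            t.length * ((ml.length : Int) - s).toNat.factorial := by
          have ha : s ≤ a := hmem a List.mem_cons_self
          unfold pvPush
          dsimp only
          split
          · simp only [pvStackW, List.map_cons, List.sum_cons, pvFrameW]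
            have : ((ml.length : Int) + 1 - (a + 1)).toNat ≤ ((ml.length : Int) - s).toNat := by
              omega
            have := Nat.factorial_le this
            omega
          · omega
      _ = pvStackW ml.length st + (t.length + 1) * ((ml.length : Int) - s).toNat.factorial := by
          ring

theorem pvStackW_expand_lt (ml : List (List Int)) (fin : Int) (sel : List (List Int))
    (s : Int) (hs : s < (ml.length : Int)) (rest : List (Int × Int × List (List Int))) :
    pvStackW ml.length
        ((PySem.List.pyRange s (ml.length : Int) 1).reverse.foldl (pvPush ml fin sel) rest) <
      pvStackW ml.length ((s, fin, sel) :: rest) := by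
  have hmem : ∀ i ∈ (PySem.List.pyRange s (ml.length : Int) 1).reverse, s ≤ i := by
    intro i hi
    rw [List.mem_reverse, PySem.List.mem_pyRange_one] at hi
    exact hi.1
  have hle := pvStackW_push_le ml fin sel s _ rest hmem
  have hlen : (PySem.List.pyRange s (ml.length : Int) 1).reverse.length =
      ((ml.length : Int) - s).toNat := by
    rw [List.length_reverse, PySem.List.length_pyRange_one]
  rw [hlen] at hle
  rw [pvStackW_cons]
  set m : Nat := ((ml.length : Int) - s).toNat with hm
  have hm1 : 1 ≤ m := by omega
  have hw : pvFrameW (ml.length : Int) s = (m + 1).factorial := by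
    unfold pvFrameW
    congr 1
    omega
  rw [hw]
  have hmf : m * m.factorial < (m + 1).factorial := by
    rw [Nat.factorial_succ]
    have : 0 < m.factorial := Nat.factorial_pos m
    nlinarith
  omega

theorem pvStackW_tail_lt (n : Int) (s fin : Int) (sel : List (List Int))
    (rest : List (Int × Int × List (List Int))) :
    pvStackW n rest < pvStackW n ((s, fin, sel) :: rest) := by
  rw [pvStackW_cons]
  show pvStackW n rest < pvFrameW n s + pvStackW n rest
  have : 0 < pvFrameW n s := Nat.factorial_pos _
  omega

-- B's while-loop over the explicit stack (head = top of Python's list-stack)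
def msB_loop (ml : List (List Int)) (acc : List (List (List Int))) (mc : List Int)
    (stack : List (Int × Int × List (List Int))) : List (List (List Int)) × List Int :=
  match stack with
  | [] => (acc, mc)
  | (s, fin, sel) :: rest =>
    if s ≥ (ml.length : Int) then
      let r := pvLeafB sel acc mc
      msB_loop ml r.1 r.2 rest
    else
      msB_loop ml acc mc
        ((PySem.List.pyRange s (ml.length : Int) 1).reverse.foldl (pvPush ml fin sel) rest)
termination_by pvStackW ml.length stack
decreasing_by
  · exact pvStackW_tail_lt (ml.length : Int) s fin sel rest
  · exact pvStackW_expand_lt ml fin sel s (lt_of_not_ge (by assumption)) rest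

def meeting_selection_alt (meeting_list : List (List Int)) (start : Int) (finish_of_before : Int) (selected : List (List Int)) (all_schedules : Option (List (List (List Int)))) (max_count : Option (List Int)) : List (List (List Int)) × List Int :=
  let acc := match all_schedules with | none => [] | some a => a
  let mc := match max_count with | none => [0] | some m => m
  msB_loop meeting_list acc mc [(start, finish_of_before, selected)]

-- ===== PRECONDITION & SPEC =====
-- Pre_ excludes exactly the inputs on which A raises IndexError (a scanned meeting with
-- fewer than two entries, or a start below -len with start < len), plus max_count = Some []
-- (on which A raises IndexError whenever the leaf logic is reached; in the rare case where
-- no leaf is reachable A returns without touching max_count[0] — see cites).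
def Pre_meeting_selection (meeting_list : List (List Int)) (start : Int) (finish_of_before : Int) (selected : List (List Int)) (all_schedules : Option (List (List (List Int)))) (max_count : Option (List Int)) : Prop :=
  max_count ≠ some [] ∧
  (start ≥ (meeting_list.length : Int) ∨
    (start ≥ -(meeting_list.length : Int) ∧
      ∀ m ∈ (if start < 0 then meeting_list else meeting_list.drop start.toNat),
        2 ≤ m.length))
instance (meeting_list : List (List Int)) (start : Int) (finish_of_before : Int) (selected : List (List Int)) (all_schedules : Option (List (List (List Int)))) (max_count : Option (List Int)) : Decidable (Pre_meeting_selection meeting_list start finish_of_before selected all_schedules max_count) := by unfold Pre_meeting_selection; infer_instance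

def pvWitness_meeting_selection : List (List Int) × Int × Int × List (List Int) × Option (List (List (List Int))) × Option (List Int) :=
  ([[1, 2], [3, 4]], 0, 0, [], none, none)

def Spec_meeting_selection (meeting_list : List (List Int)) (start : Int) (finish_of_before : Int) (selected : List (List Int)) (all_schedules : Option (List (List (List Int)))) (max_count : Option (List Int)) (out : List (List (List Int)) × List Int) : Prop := out = meeting_selection_alt meeting_list start finish_of_before selected all_schedules max_count
instance (meeting_list : List (List Int)) (start : Int) (finish_of_before : Int) (selected : List (List Int)) (all_schedules : Option (List (List (List Int)))) (max_count : Option (List Int)) (out : List (List (List Int)) × List Int) : Decidable (Spec_meeting_selection meeting_list start finish_of_before selected all_schedules max_count out) := by unfold Spec_meeting_selection; infer_instance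

-- ===== CLAIM (what is proved, stated in full; the proofs are below) =====
def Claim_equal_meeting_selection : Prop := ∀ (meeting_list : List (List Int)) (start : Int) (finish_of_before : Int) (selected : List (List Int)) (all_schedules : Option (List (List (List Int)))) (max_count : Option (List Int)), Dom_meeting_selection meeting_list start finish_of_before selected all_schedules max_count → Pre_meeting_selection meeting_list start finish_of_before selected all_schedules max_count → Spec_meeting_selection meeting_list start finish_of_before selected all_schedules max_count (meeting_selection meeting_list start finish_of_before selected all_schedules max_count)

-- ===== LEMMAS AND PROOFS =====

theorem pvPush_pos (ml : List (List Int)) (fin : Int) (sel : List (List Int))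
    (st : List (Int × Int × List (List Int))) (i : Int)
    (hc : PySem.List.pyGetD (PySem.List.pyGetD ml i []) 0 0 > fin) :
    pvPush ml fin sel st i =
      (i + 1, PySem.List.pyGetD (PySem.List.pyGetD ml i []) 1 0,
        sel ++ [PySem.List.pyGetD ml i []]) :: st := by
  unfold pvPush
  dsimp only
  rw [if_pos hc]

theorem pvPush_neg (ml : List (List Int)) (fin : Int) (sel : List (List Int))
    (st : List (Int × Int × List (List Int))) (i : Int)
    (hc : ¬ PySem.List.pyGetD (PySem.List.pyGetD ml i []) 0 0 > fin) :
    pvPush ml fin sel st i = st := by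
  unfold pvPush
  dsimp only
  rw [if_neg hc]

-- Main simulation lemma: processing one frame on B's stack performs exactly what one call
-- of A's recursion performs on (all_schedules, max_count), and A returns selected unchanged.
-- Proved jointly with the analogous statement about A's index loop, by induction on a
-- Nat bound k on the (shared) termination measure.
theorem pv_key (ml : List (List Int)) : ∀ k : Nat,
    (∀ s fin sel acc mc rest, 2 * ((ml.length : Int) + 1 - s).toNat + 1 ≤ k →
      msB_loop ml acc mc ((s, fin, sel) :: rest) =
        msB_loop ml (msA_go ml s fin sel acc mc).2.1 (msA_go ml s fin sel acc mc).2.2 rest ∧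
      (msA_go ml s fin sel acc mc).1 = sel) ∧
    (∀ i fin sel acc mc rest, 2 * ((ml.length : Int) + 1 - i).toNat ≤ k →
      msB_loop ml acc mc
          ((PySem.List.pyRange i (ml.length : Int) 1).reverse.foldl (pvPush ml fin sel) rest) =
        msB_loop ml (msA_loop ml i fin sel acc mc).2.1 (msA_loop ml i fin sel acc mc).2.2 rest ∧
      (msA_loop ml i fin sel acc mc).1 = sel) := by
  intro k
  induction k with
  | zero =>
    constructor
    · intro s fin sel acc mc rest hk
      omega
    · intro i fin sel acc mc rest hk
      have hi : (ml.length : Int) < i := by omega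
      rw [PySem.List.pyRange_one_eq_nil (by omega), msA_loop, dif_neg (by omega)]
      simp only [List.reverse_nil, List.foldl_nil]
      exact ⟨trivial, trivial⟩
  | succ k ih =>
    constructor
    · intro s fin sel acc mc rest hk
      rw [msA_go, msB_loop]
      by_cases hs : s ≥ (ml.length : Int)
      · rw [if_pos hs, if_pos hs]
        refine ⟨?_, rfl⟩
        unfold pvLeafA pvLeafB
        rfl
      · rw [if_neg hs, if_neg hs]
        exact ih.2 s fin sel acc mc rest (by omega)
    · intro i fin sel acc mc rest hk
      by_cases hi : i < (ml.length : Int)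
      · rw [PySem.List.pyRange_one_cons hi, msA_loop, dif_pos hi]
        rw [List.reverse_cons, List.foldl_append, List.foldl_cons, List.foldl_nil]
        dsimp only
        by_cases hc : PySem.List.pyGetD (PySem.List.pyGetD ml i []) 0 0 > fin
        · rw [if_pos hc, pvPush_pos ml fin sel _ i hc]
          obtain ⟨hS, hSel⟩ := ih.1 (i + 1) (PySem.List.pyGetD (PySem.List.pyGetD ml i []) 1 0)
            (sel ++ [PySem.List.pyGetD ml i []]) acc mc
            ((PySem.List.pyRange (i + 1) (ml.length : Int) 1).reverse.foldl
              (pvPush ml fin sel) rest) (by omega)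
          rw [hS, hSel]
          have hdrop : (sel ++ [PySem.List.pyGetD ml i []]).dropLast = sel := by simp
          rw [hdrop]
          exact ih.2 (i + 1) fin sel _ _ rest (by omega)
        · rw [if_neg hc, pvPush_neg ml fin sel _ i hc]
          exact ih.2 (i + 1) fin sel acc mc rest (by omega)
      · rw [PySem.List.pyRange_one_eq_nil (by omega), msA_loop, dif_neg hi]
        simp only [List.reverse_nil, List.foldl_nil]
        exact ⟨trivial, trivial⟩

theorem pv_main (ml : List (List Int)) (s fin : Int) (sel : List (List Int))
    (acc : List (List (List Int))) (mc : List Int) :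
    msB_loop ml acc mc [(s, fin, sel)] =
      ((msA_go ml s fin sel acc mc).2.1, (msA_go ml s fin sel acc mc).2.2) := by
  have h := ((pv_key ml (2 * ((ml.length : Int) + 1 - s).toNat + 1)).1 s fin sel acc mc []
    (le_refl _)).1
  rw [h, msB_loop]

-- ===== VERDICT (by name: the statement is the Claim_ definition above) =====
theorem meeting_selection_spec : Claim_equal_meeting_selection := by
  intro ml start fin sel allS mcOpt _ _
  unfold Spec_meeting_selection meeting_selection meeting_selection_alt
  rw [pv_main]
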